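-- pv_equiv track=rewrite | github.com/scottdaniel/SampleRegistry | pythonlib/sample_registry/mapping.py | _cast
-- ===== SOURCE A (Python) =====
-- def _cast(records, left_cols, right_cols, missing="NA"):
--     records = list(records)
--     all_cols = set(left_cols + right_cols)
--     for r in records:
--         for key in sorted(r.keys()):
--             if key not in all_cols:
--                 left_cols.append(key)
--                 all_cols.add(key)
--
--     header = left_cols + right_cols
--     yield header
--
--     for r in records:
--         row = [missing for _ in header]
--         for key, val in r.items():
--             idx = header.index(key)
--             row[idx] = val
--         yield row
-- ===== SOURCE B (Python) =====
-- # Builds the body column-major (one list of values per header column) and then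
-- # transposes by row index, instead of A's row-major scatter through header.index
-- # into prefilled rows; return-value equivalence only (A mutates left_cols, B does not).
-- def _cast(records, left_cols, right_cols, missing="NA"):
--     records = list(records)
--     base = set(left_cols) | set(right_cols)
--     seen = dict.fromkeys(k for r in records for k in sorted(r))
--     extras = [k for k in seen if k not in base]
--     header = left_cols + extras + right_cols
--     yield header
--     columns = [[r.get(c, missing) for r in records] for c in header]
--     for i in range(len(records)):
--         yield [col[i] for col in columns]
-- ===== Notes on version B (the rewrite author's own statement) =====
-- stated objective: alternative
-- what changed: B builds the table body column-major -- one full list of values per header column via dict lookup -- and then transposes it by row index, instead of A's row-major scatter that prefills each row with the sentinel and writes record values into header.index(key) slots; column discovery is a flat dedup-and-filter pass over all sorted record keys instead of A's in-place mutation of left_cols guarded by a seen set.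
import Mathlib
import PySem

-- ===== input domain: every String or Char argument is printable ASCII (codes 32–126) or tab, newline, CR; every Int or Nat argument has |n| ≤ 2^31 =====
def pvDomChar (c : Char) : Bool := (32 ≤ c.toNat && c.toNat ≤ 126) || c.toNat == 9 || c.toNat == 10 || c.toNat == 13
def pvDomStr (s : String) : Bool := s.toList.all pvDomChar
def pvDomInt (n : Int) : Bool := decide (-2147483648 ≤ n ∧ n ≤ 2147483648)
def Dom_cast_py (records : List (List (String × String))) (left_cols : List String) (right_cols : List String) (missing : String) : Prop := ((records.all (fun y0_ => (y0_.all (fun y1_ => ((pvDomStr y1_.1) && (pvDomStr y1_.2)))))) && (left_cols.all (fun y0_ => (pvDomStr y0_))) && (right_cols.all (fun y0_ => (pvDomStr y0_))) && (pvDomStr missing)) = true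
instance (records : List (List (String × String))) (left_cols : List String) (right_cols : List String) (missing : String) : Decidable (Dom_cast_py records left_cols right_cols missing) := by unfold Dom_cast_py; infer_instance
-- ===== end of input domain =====

-- B builds the body column-major (one value list per header column) and transposes it
-- by row index, instead of A's row-major scatter through header.index into prefilled
-- rows (alternative decomposition; return-value equivalence only: A mutates left_cols
-- in place, B does not).

-- ===== PORT A =====
def cast_py (records : List (List (String × String))) (left_cols : List String) (right_cols : List String) (missing : String) : List (List String) :=
  let st := records.foldl
    (fun (st : List String × PySem.Set String) r =>
      (PySem.List.sorted (PySem.Dict.ofList r).keys (fun k => k) false).foldl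
        (fun st key =>
          if st.2.contains key then st
          else (st.1 ++ [key], PySem.Set.add st.2 key)) st)
    (left_cols, PySem.Set.ofList (left_cols ++ right_cols))
  let header := st.1 ++ right_cols
  header :: records.map (fun r =>
    (PySem.Dict.ofList r).items.foldl
      (fun row kv =>
        match PySem.List.index? header kv.1 with
        | some idx => row.set idx kv.2
        | none => row)   -- Python would raise ValueError here; unreachable: every record key is in header
      (header.map (fun _ => missing)))

-- ===== PORT B =====
def cast_py_alt (records : List (List (String × String))) (left_cols : List String) (right_cols : List String) (missing : String) : List (List String) :=
  let base := PySem.Set.union (PySem.Set.ofList left_cols) (PySem.Set.ofList right_cols)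
  let seen := PySem.List.dedup (records.flatMap (fun r => PySem.List.sorted (PySem.Dict.ofList r).keys (fun k => k) false))
  let extras := seen.filter (fun k => !(base.contains k))
  let header := left_cols ++ extras ++ right_cols
  let columns := header.map (fun c => records.map (fun r => (PySem.Dict.ofList r).getD c missing))
  header :: (PySem.List.pyRange 0 (records.length : Int) 1).map (fun i =>
    columns.map (fun col => PySem.List.pyGetD col i missing))
    -- col[i]: i ranges over 0..len(records)-1 and every column has length len(records),
    -- so the pyGetD default is unreachable (Python never raises here)

-- ===== PRECONDITION & SPEC =====
-- Pre_ excludes inputs where a duplicated column name in left_cols ++ right_cols is also a key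
-- of some record: there the header carries that column twice and A writes the value only into the
-- first duplicate slot (an accident of list.index's first match) while B fills every slot — a
-- corner no caller specifies.
def Pre_cast_py (records : List (List (String × String))) (left_cols : List String) (right_cols : List String) (missing : String) : Prop :=
  ∀ x ∈ left_cols ++ right_cols,
    (left_cols ++ right_cols).count x ≤ 1 ∨ ∀ r ∈ records, ∀ p ∈ r, p.1 ≠ x
instance (records : List (List (String × String))) (left_cols : List String) (right_cols : List String) (missing : String) : Decidable (Pre_cast_py records left_cols right_cols missing) := by unfold Pre_cast_py; infer_instance

def pvWitness_cast_py : (List (List (String × String))) × List String × List String × String :=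
  ([[("a", "1"), ("c", "2")]], ["a"], ["b"], "NA")

def Spec_cast_py (records : List (List (String × String))) (left_cols : List String) (right_cols : List String) (missing : String) (out : List (List String)) : Prop := out = cast_py_alt records left_cols right_cols missing
instance (records : List (List (String × String))) (left_cols : List String) (right_cols : List String) (missing : String) (out : List (List String)) : Decidable (Spec_cast_py records left_cols right_cols missing out) := by unfold Spec_cast_py; infer_instance

-- ===== CLAIM (what is proved, stated in full; the proofs are below) =====
def Claim_equal_cast_py : Prop := ∀ (records : List (List (String × String))) (left_cols : List String) (right_cols : List String) (missing : String), Dom_cast_py records left_cols right_cols missing → Pre_cast_py records left_cols right_cols missing → Spec_cast_py records left_cols right_cols missing (cast_py records left_cols right_cols missing)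

-- ===== LEMMAS AND PROOFS =====

def ded : (String → Bool) → List String → List String
  | _, [] => []
  | p, k :: ks => if p k then ded p ks else k :: ded (fun x => p x || x == k) ks

theorem ded_congr : ∀ (ks : List String) {p q : String → Bool}, (∀ x, p x = q x) → ded p ks = ded q ks := by
  intro ks
  induction ks with
  | nil => intro p q h; rfl
  | cons k ks ih =>
    intro p q h
    simp only [ded, h k]
    split
    · exact ih h
    · exact congrArg _ (ih (fun x => by simp [h x]))

theorem contains_add (s : PySem.Set String) (k x : String) :
    (PySem.Set.add s k).contains x = (s.contains x || x == k) := by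
  rw [Bool.eq_iff_iff]
  simp only [Bool.or_eq_true, PySem.Set.contains_iff, beq_iff_eq]
  exact PySem.Set.mem_add s k x

theorem ded_append : ∀ (xs : List String) (p : String → Bool) (ys : List String),
    ded p (xs ++ ys) = ded p xs ++ ded (fun x => p x || xs.contains x) ys := by
  intro xs
  induction xs with
  | nil => intro p ys; simp [ded]
  | cons k xs ih =>
    intro p ys
    simp only [List.cons_append, ded]
    by_cases hp : p k
    · simp only [hp, if_true]
      rw [ih]
      congr 1
      refine ded_congr ys (fun x => ?_)
      by_cases hx : x = k
      · subst hx; simp [hp]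
      · rw [Bool.eq_iff_iff]
        simp [hx]
    · simp only [hp, Bool.false_eq_true, if_false]
      rw [ih]
      simp only [List.cons_append]
      congr 2
      refine ded_congr ys (fun x => ?_)
      rw [Bool.eq_iff_iff]
      by_cases hx : x = k
      · subst hx; simp
      · simp [hx]

theorem ded_eq_dedup_filter : ∀ (ks : List String) (p : String → Bool),
    ded p ks = (PySem.List.dedup ks).filter (fun k => !p k) := by
  intro ks
  induction ks with
  | nil => intro p; rfl
  | cons k ks ih =>
    intro p
    have hdis : (PySem.Set.ofList ks).discard k
        = (PySem.Set.ofList ks).filter (fun x => !(x == k)) := rfl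
    simp only [ded, PySem.List.dedup_eq_ofList] at *
    rw [PySem.Set.ofList_cons, hdis]
    by_cases hp : p k
    · simp only [hp, if_true, List.filter_cons, Bool.not_true, Bool.false_eq_true, if_false]
      rw [ih, List.filter_filter]
      refine List.filter_congr (fun x hx => ?_)
      by_cases hxk : x = k
      · subst hxk; simp [hp]
      · simp [hxk]
    · simp only [hp, Bool.false_eq_true, if_false, List.filter_cons, Bool.not_false, if_pos]
      rw [ih, List.filter_filter]
      refine congrArg _ (List.filter_congr (fun x hx => ?_))
      rw [Bool.eq_iff_iff]
      by_cases hxk : x = k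
      · subst hxk; simp
      · simp [hxk]

theorem inner_fold (ks : List String) : ∀ (lc : List String) (s : PySem.Set String),
    (ks.foldl (fun st key => if st.2.contains key then st
        else (st.1 ++ [key], PySem.Set.add st.2 key)) (lc, s)).1
      = lc ++ ded (fun x => s.contains x) ks
    ∧ ∀ x, ((ks.foldl (fun st key => if st.2.contains key then st
        else (st.1 ++ [key], PySem.Set.add st.2 key)) (lc, s)).2).contains x
      = (s.contains x || ks.contains x) := by
  induction ks with
  | nil => intro lc s; exact ⟨by simp [ded], fun x => by simp⟩
  | cons k ks ih =>
    intro lc s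
    simp only [List.foldl_cons]
    by_cases hk : s.contains k = true
    · rw [if_pos hk]
      refine ⟨?_, fun x => ?_⟩
      · rw [(ih lc s).1]
        simp only [ded]
        rw [if_pos hk]
      · rw [(ih lc s).2 x, Bool.eq_iff_iff]
        simp only [Bool.or_eq_true, PySem.Set.contains_iff, List.contains_iff_mem, List.mem_cons]
        have hks : k ∈ s := (PySem.Set.contains_iff s k).mp hk
        constructor
        · rintro (h | h)
          · exact Or.inl h
          · exact Or.inr (Or.inr h)
        · rintro (h | h | h)
          · exact Or.inl h
          · exact Or.inl (h ▸ hks)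
          · exact Or.inr h
    · rw [if_neg hk]
      refine ⟨?_, fun x => ?_⟩
      · rw [(ih (lc ++ [k]) (PySem.Set.add s k)).1]
        have hc : ded (fun x => (PySem.Set.add s k).contains x) ks
            = ded (fun x => s.contains x || x == k) ks :=
          ded_congr ks (fun x => contains_add s k x)
        rw [hc]
        simp only [ded]
        rw [if_neg hk]
        simp only [List.append_assoc, List.singleton_append]
      · rw [(ih (lc ++ [k]) (PySem.Set.add s k)).2 x, contains_add, Bool.eq_iff_iff]
        simp only [Bool.or_eq_true, PySem.Set.contains_iff, List.contains_iff_mem,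
          List.mem_cons, beq_iff_eq]
        tauto

theorem outer_fold {β : Type} (f : β → List String) (rs : List β) :
    ∀ (lc : List String) (s : PySem.Set String),
    (rs.foldl (fun st r => (f r).foldl (fun st key => if st.2.contains key then st
        else (st.1 ++ [key], PySem.Set.add st.2 key)) st) (lc, s)).1
      = lc ++ ded (fun x => s.contains x) (rs.flatMap f) := by
  induction rs with
  | nil => intro lc s; simp [ded]
  | cons r rs ih =>
    intro lc s
    simp only [List.foldl_cons, List.flatMap_cons]
    have hstep : ((f r).foldl (fun st key => if st.2.contains key then st
        else (st.1 ++ [key], PySem.Set.add st.2 key)) (lc, s))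
        = (((f r).foldl (fun st key => if st.2.contains key then st
            else (st.1 ++ [key], PySem.Set.add st.2 key)) (lc, s)).1,
           ((f r).foldl (fun st key => if st.2.contains key then st
            else (st.1 ++ [key], PySem.Set.add st.2 key)) (lc, s)).2) := rfl
    rw [hstep, ih]
    rw [(inner_fold (f r) lc s).1]
    have hc : ded (fun x => (((f r).foldl (fun st key => if st.2.contains key then st
        else (st.1 ++ [key], PySem.Set.add st.2 key)) (lc, s)).2).contains x) (rs.flatMap f)
        = ded (fun x => s.contains x || (f r).contains x) (rs.flatMap f) :=
      ded_congr _ (fun x => (inner_fold (f r) lc s).2 x)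
    rw [hc, ded_append]
    simp [List.append_assoc]

-- B's transpose of the column-major table is the row-major gather
theorem transpose_rows {α : Type} (recs : List α) (hdr : List String)
    (g : α → String → String) (d : String) :
    (PySem.List.pyRange 0 (recs.length : Int) 1).map (fun i =>
       (hdr.map (fun c => recs.map (fun r => g r c))).map
         (fun col => PySem.List.pyGetD col i d))
    = recs.map (fun r => hdr.map (fun c => g r c)) := by
  apply List.ext_getElem
  · simp [PySem.List.length_pyRange_one]
  · intro j hj hj'
    simp only [PySem.List.length_pyRange_one, Int.sub_zero, Int.toNat_natCast,
      List.length_map] at hj hj'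
    simp only [List.getElem_map, PySem.List.getElem_pyRange_one, List.map_map, Int.zero_add]
    refine List.map_congr_left (fun c _ => ?_)
    have h0 : (0 : Int) ≤ (j : Int) := by positivity
    have hlt : (j : Int) < ((recs.map (fun r => g r c)).length : Int) := by
      simp only [List.length_map]; exact_mod_cast hj
    rw [Function.comp_apply, PySem.List.pyGetD_eq_getElem _ _ h0 hlt]
    simp

-- writing v at header.index k into a row that is a map over header
theorem set_map (header : List String) (g : String → String)
    {k : String} {i : Nat} (hidx : PySem.List.index? header k = some i)
    (hcount : header.count k = 1) (v : String) :
    (header.map g).set i v = header.map (fun c => if c = k then v else g c) := by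
  obtain ⟨pre, suf, heq, hlen, hpre⟩ := (PySem.List.index?_eq_some_iff header k i).mp hidx
  subst heq
  subst hlen
  have hsuf : k ∉ suf := by
    simp only [List.count_append, List.count_cons_self] at hcount
    have h0 : suf.count k = 0 := by
      have h1 := List.count_eq_zero.mpr hpre
      omega
    exact List.count_eq_zero.mp h0
  have huniq : ∀ (j : Nat) (hj : j < (pre ++ k :: suf).length),
      (pre ++ k :: suf)[j] = k → j = pre.length := by
    intro j hj hk
    rcases lt_trichotomy j pre.length with h | h | h
    · exfalso
      rw [List.getElem_append_left h] at hk
      exact hpre (hk ▸ List.getElem_mem h)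
    · exact h
    · exfalso
      rw [List.getElem_append_right (by omega), List.getElem_cons] at hk
      rw [dif_neg (by omega)] at hk
      exact hsuf (hk ▸ List.getElem_mem _)
  have hval : (pre ++ k :: suf)[pre.length]'(by
      simp only [List.length_append, List.length_cons]; omega) = k := by
    rw [List.getElem_append_right (le_refl _)]
    simp
  apply List.ext_getElem (by simp)
  intro j hj hj'
  simp only [List.length_set, List.length_map] at hj
  rw [List.getElem_set, List.getElem_map, List.getElem_map]
  by_cases hij : pre.length = j
  · subst hij
    rw [if_pos rfl, if_pos hval]
  · rw [if_neg hij, if_neg (fun hk => hij ((huniq j hj hk).symm))]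

-- A's scatter loop keeps the row a map over header, accumulating point updates
theorem scatter (header : List String) :
    ∀ (ps : List (String × String)) (g : String → String),
    (∀ p ∈ ps, p.1 ∈ header ∧ header.count p.1 = 1) →
    ps.foldl (fun row kv =>
        match PySem.List.index? header kv.1 with
        | some idx => row.set idx kv.2
        | none => row) (header.map g)
      = header.map (ps.foldl (fun g kv => fun c => if c = kv.1 then kv.2 else g c) g) := by
  intro ps
  induction ps with
  | nil => intro g h; simp
  | cons kv ps ih =>
    intro g h
    have hmem := h kv (List.mem_cons_self)
    obtain ⟨i, hi⟩ := Option.isSome_iff_exists.mp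
      ((PySem.List.index?_isSome_iff header kv.1).mpr hmem.1)
    simp only [List.foldl_cons, hi]
    rw [set_map header g hi hmem.2 kv.2]
    exact ih _ (fun p hp => h p (List.mem_cons_of_mem _ hp))

theorem eval_upd_not_mem : ∀ (ps : List (String × String)) (g : String → String) (c : String),
    c ∉ ps.map (·.1) →
    ps.foldl (fun g kv => fun c => if c = kv.1 then kv.2 else g c) g c = g c := by
  intro ps
  induction ps with
  | nil => intro g c h; rfl
  | cons kv ps ih =>
    intro g c h
    simp only [List.map_cons, List.mem_cons, not_or] at h
    simp only [List.foldl_cons]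
    rw [ih _ c h.2, if_neg h.1]

theorem eval_upd_mem : ∀ (ps : List (String × String)) (g : String → String) {c v : String},
    (ps.map (·.1)).Nodup → (c, v) ∈ ps →
    ps.foldl (fun g kv => fun c => if c = kv.1 then kv.2 else g c) g c = v := by
  intro ps
  induction ps with
  | nil => intro g c v h hm; cases hm
  | cons kv ps ih =>
    intro g c v hnd hm
    simp only [List.map_cons, List.nodup_cons] at hnd
    simp only [List.foldl_cons]
    rcases List.mem_cons.mp hm with h | h
    · subst h
      rw [eval_upd_not_mem ps _ c hnd.1, if_pos rfl]
    · exact ih _ hnd.2 h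

-- ===== VERDICT (by name: the statement is the Claim_ definition above) =====
theorem cast_py_spec : Claim_equal_cast_py := by
  intro records left_cols right_cols missing _hdom hpre
  unfold Spec_cast_py cast_py cast_py_alt
  dsimp only
  rw [outer_fold]
  set base := PySem.Set.union (PySem.Set.ofList left_cols) (PySem.Set.ofList right_cols) with hbase
  set seen := PySem.List.dedup (records.flatMap
      (fun r => PySem.List.sorted (PySem.Dict.ofList r).keys (fun k => k) false)) with hseen
  set extras := seen.filter (fun k => !(base.contains k)) with hextras
  have hext : ded (fun x => (PySem.Set.ofList (left_cols ++ right_cols)).contains x)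
      (records.flatMap (fun r => PySem.List.sorted (PySem.Dict.ofList r).keys (fun k => k) false))
      = extras := by
    rw [ded_eq_dedup_filter, hextras, hseen]
    refine List.filter_congr (fun x _ => ?_)
    congr 1
    rw [Bool.eq_iff_iff, hbase]
    simp [PySem.Set.mem_union, PySem.Set.mem_ofList]
  rw [hext, List.append_assoc]
  set header := left_cols ++ (extras ++ right_cols) with hheader
  rw [transpose_rows records header (fun r c => (PySem.Dict.ofList r).getD c missing) missing]
  have hextnd : extras.Nodup := (PySem.List.nodup_dedup _).filter _
  have hextbase : ∀ x ∈ extras, x ∉ left_cols ∧ x ∉ right_cols := by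
    intro x hx
    have h2 := (List.mem_filter.mp hx).2
    rw [Bool.not_eq_eq_eq_not, Bool.not_true] at h2
    have hxn : x ∉ base := fun hmem => by
      rw [(PySem.Set.contains_iff base x).mpr hmem] at h2; cases h2
    rw [hbase] at hxn
    simp only [PySem.Set.mem_union, PySem.Set.mem_ofList] at hxn
    exact ⟨fun h => hxn (Or.inl h), fun h => hxn (Or.inr h)⟩
  -- each record key lies in header, in a unique column
  have hsub : ∀ r ∈ records, ∀ p ∈ (PySem.Dict.ofList r).items,
      p.1 ∈ header ∧ header.count p.1 = 1 := by
    intro r hr p hp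
    have hk : p.1 ∈ (PySem.Dict.ofList r).keys := PySem.Dict.mem_keys_of_mem_items _ hp
    have hkeys : (PySem.Dict.ofList r).keys = PySem.Set.ofList (r.map (·.1)) := by
      rw [show PySem.Dict.ofList r = r.foldl (fun d q => d.insert q.1 q.2) PySem.Dict.empty from rfl,
        PySem.Dict.keys_foldl_insert_key r (fun q => q.1) (fun d q => q.2) PySem.Dict.empty]
      rfl
    obtain ⟨q, hq, hq1⟩ : ∃ q ∈ r, q.1 = p.1 := by
      have hmap := hk
      rw [hkeys, PySem.Set.mem_ofList] at hmap
      obtain ⟨q, hq, hq1⟩ := List.mem_map.mp hmap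
      exact ⟨q, hq, hq1⟩
    by_cases hb : p.1 ∈ left_cols ++ right_cols
    · have hnex : p.1 ∉ extras := by
        intro hx
        rcases List.mem_append.mp hb with h | h
        · exact (hextbase _ hx).1 h
        · exact (hextbase _ hx).2 h
      have hcnt : (left_cols ++ right_cols).count p.1 ≤ 1 := by
        rcases hpre p.1 hb with h | h
        · exact h
        · exact absurd hq1 (h r hr q hq)
      constructor
      · rcases List.mem_append.mp hb with h | h
        · exact List.mem_append.mpr (Or.inl h)
        · exact List.mem_append.mpr (Or.inr (List.mem_append.mpr (Or.inr h)))
      · rw [hheader]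
        have h1 := List.one_le_count_iff.mpr hb
        have h0 := List.count_eq_zero.mpr hnex
        simp only [List.count_append] at *
        omega
    · have hnl : p.1 ∉ left_cols := fun h => hb (List.mem_append.mpr (Or.inl h))
      have hnr : p.1 ∉ right_cols := fun h => hb (List.mem_append.mpr (Or.inr h))
      have hx : p.1 ∈ extras := by
        rw [hextras, List.mem_filter]
        refine ⟨by
          rw [hseen, PySem.List.mem_dedup, List.mem_flatMap]
          exact ⟨r, hr, (PySem.List.mem_sorted _ _ _ _).mpr hk⟩, ?_⟩
        cases hc : base.contains p.1
        · rfl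
        · exfalso
          have hcb := (PySem.Set.contains_iff base p.1).mp hc
          rw [hbase] at hcb
          simp only [PySem.Set.mem_union, PySem.Set.mem_ofList] at hcb
          rcases hcb with h | h
          · exact hnl h
          · exact hnr h
      constructor
      · exact List.mem_append.mpr (Or.inr (List.mem_append.mpr (Or.inl hx)))
      · rw [hheader]
        have h1 := List.one_le_count_iff.mpr hx
        have h2 := List.nodup_iff_count_le_one.mp hextnd p.1
        have h0l := List.count_eq_zero.mpr hnl
        have h0r := List.count_eq_zero.mpr hnr
        simp only [List.count_append] at *
        omega
  congr 1
  refine List.map_congr_left (fun r hr => ?_)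
  have hkn : ((PySem.Dict.ofList r).items.map (·.1)).Nodup :=
    PySem.Dict.nodup_keys_ofList r
  rw [scatter header (PySem.Dict.ofList r).items (fun _ => missing) (hsub r hr)]
  refine List.map_congr_left (fun col hcol => ?_)
  by_cases hc : col ∈ (PySem.Dict.ofList r).keys
  · have hc' : col ∈ (PySem.Dict.ofList r).items.map (·.1) := hc
    obtain ⟨p, hp, hp1⟩ := List.mem_map.mp hc'
    obtain ⟨k0, v0⟩ := p
    subst hp1
    rw [eval_upd_mem _ _ hkn hp,
      PySem.Dict.getD_of_mem_items _ hp (PySem.Dict.nodup_keys_ofList r) missing]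
  · rw [eval_upd_not_mem _ _ _ hc]
    have hcf : (PySem.Dict.ofList r).contains col = false := by
      cases hb : (PySem.Dict.ofList r).contains col
      · rfl
      · exact absurd ((PySem.Dict.contains_iff_mem_keys _ col).mp hb) hc
    rw [PySem.Dict.getD_of_not_contains _ missing hcf]
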